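-- pv_equiv track=rewrite | github.com/nkoukou/parametrised_negativity | QUBIT/Summary_20210302/QUBIT_hidden_shift_test_Pauli.py | meas_string
-- ===== SOURCE A (Python) =====
-- def meas_string(meas_qubit_index, string_len):
--     meas_out = ''
--     for index in range(string_len):
--         if index == meas_qubit_index:
--             meas_out += '1'
--         else:
--             meas_out +='/'
--     return meas_out
-- ===== SOURCE B (Python) =====
-- def meas_string(meas_qubit_index, string_len):
--     buf = ['/'] * string_len
--     if 0 <= meas_qubit_index < string_len:
--         buf[meas_qubit_index] = '1'
--     return ''.join(buf)
-- ===== Notes on version B (the rewrite author's own statement) =====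
-- stated objective: faster
-- what changed: Replaces the per-index if/else string-concatenation loop by allocating a uniform '/'-filled list once and patching the single in-range position to '1' before joining.
import Mathlib
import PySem

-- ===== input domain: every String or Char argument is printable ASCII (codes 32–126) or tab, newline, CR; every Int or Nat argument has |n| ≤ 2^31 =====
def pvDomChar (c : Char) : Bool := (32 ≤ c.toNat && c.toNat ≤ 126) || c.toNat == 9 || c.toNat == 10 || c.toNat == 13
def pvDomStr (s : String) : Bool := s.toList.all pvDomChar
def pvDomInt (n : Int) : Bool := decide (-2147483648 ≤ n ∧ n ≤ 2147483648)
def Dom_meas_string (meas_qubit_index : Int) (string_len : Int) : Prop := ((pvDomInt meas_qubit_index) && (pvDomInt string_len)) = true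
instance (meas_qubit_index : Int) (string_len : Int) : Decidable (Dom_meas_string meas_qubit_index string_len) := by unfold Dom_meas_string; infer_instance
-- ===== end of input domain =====

-- B fills a '/'-list once and patches the single in-range slot to '1', instead of A's per-index if/else concatenation loop; objective: simpler.

-- ===== PORT A =====
def meas_string (meas_qubit_index : Int) (string_len : Int) : String :=
  (PySem.List.pyRange 0 string_len 1).foldl
    (fun meas_out index => meas_out ++ (if index = meas_qubit_index then "1" else "/")) ""

-- ===== PORT B =====
def meas_string_alt (meas_qubit_index : Int) (string_len : Int) : String :=
  let buf := List.replicate string_len.toNat '/'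
  let buf := if 0 ≤ meas_qubit_index ∧ meas_qubit_index < string_len
             then buf.set meas_qubit_index.toNat '1' else buf
  String.ofList buf

-- ===== PRECONDITION & SPEC =====
def Spec_meas_string (meas_qubit_index : Int) (string_len : Int) (out : String) : Prop := out = meas_string_alt meas_qubit_index string_len
instance (meas_qubit_index : Int) (string_len : Int) (out : String) : Decidable (Spec_meas_string meas_qubit_index string_len out) := by unfold Spec_meas_string; infer_instance

-- ===== CLAIM (what is proved, stated in full; the proofs are below) =====
def Claim_equal_meas_string : Prop := ∀ (meas_qubit_index : Int) (string_len : Int), Dom_meas_string meas_qubit_index string_len → Spec_meas_string meas_qubit_index string_len (meas_string meas_qubit_index string_len)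

-- ===== LEMMAS AND PROOFS =====

-- A's loop over range(n) builds the map over List.range n, character by character.
theorem meas_string_foldl_range (i : Int) (n : Nat) (init : String) :
    (PySem.List.pyRange 0 (n : Int) 1).foldl
      (fun acc index => acc ++ (if index = i then "1" else "/")) init
    = init ++ String.ofList ((List.range n).map (fun (k : Nat) => if (k : Int) = i then '1' else '/')) := by
  induction n generalizing init with
  | zero =>
    simp only [Nat.cast_zero, PySem.List.pyRange_one_eq_nil le_rfl, List.foldl_nil,
      List.range_zero, List.map_nil]
    simp
  | succ m ih =>
    have hcast : ((m + 1 : Nat) : Int) = (m : Int) + 1 := by push_cast; ring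
    have hsplit := PySem.List.pyRange_one_succ_right (a := 0) (b := (m : Int)) (by positivity)
    rw [hcast, hsplit, List.foldl_append, ih, List.range_succ, List.map_append]
    simp only [List.foldl_cons, List.foldl_nil, List.map_cons, List.map_nil]
    by_cases h1 : (m : Int) = i <;>
      simp [h1, String.append_assoc]

-- The mapped range equals B's fill-then-patch list.
theorem map_range_eq_patch (i : Int) (n : Nat) :
    (List.range n).map (fun (k : Nat) => if (k : Int) = i then '1' else '/')
    = (if 0 ≤ i ∧ i < (n : Int)
       then (List.replicate n '/').set i.toNat '1' else List.replicate n '/') := by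
  split_ifs with h
  · apply List.ext_getElem
    · simp
    · intro k hk hk'
      simp only [List.getElem_map, List.getElem_range, List.getElem_set, List.getElem_replicate]
      by_cases hki : i.toNat = k
      · have : (k : Int) = i := by omega
        simp [hki, this]
      · have : ¬ ((k : Int) = i) := by omega
        simp [hki, this]
  · apply List.ext_getElem
    · simp
    · intro k hk hk'
      simp only [List.getElem_map, List.getElem_range, List.getElem_replicate]
      have hkn : k < n := by simpa using hk
      have : ¬ ((k : Int) = i) := by omega
      simp [this]

-- ===== VERDICT (by name: the statement is the Claim_ definition above) =====
theorem meas_string_spec : Claim_equal_meas_string := by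
  intro i n _
  unfold Spec_meas_string meas_string meas_string_alt
  by_cases hn : 0 ≤ n
  · obtain ⟨m, rfl⟩ : ∃ m : Nat, n = (m : Int) := ⟨n.toNat, (Int.toNat_of_nonneg hn).symm⟩
    rw [meas_string_foldl_range, map_range_eq_patch]
    simp
  · have h1 : PySem.List.pyRange 0 n 1 = [] := PySem.List.pyRange_one_eq_nil (by omega)
    have h2 : n.toNat = 0 := by omega
    have h3 : ¬ (0 ≤ i ∧ i < n) := by omega
    simp [h1, h2, h3]
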